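-- pv_equiv track=rewrite | github.com/alexis-raymond/Daily_Coding_Problems | edabit/number_groups.py | numberGroups
-- ===== SOURCE A (Python) =====
-- def numberGroups(group1, group2, group3): # returns a sorted list of the numbers that appear in more than 1 group
-- 	duplicates = set() # create a new set to contain the duplicate numbers
--
-- 	for num in group1: # iterate through the numbers in the first group
-- 		if (num in group2 + group3): # if the iterated number is also in group2 or 3
-- 			duplicates.add(num) # add it to the set of duplicates
--
-- 	for num in group2: # iterate through the numbers in the second group
-- 		if (num in group3): # if the iterated number is also in group3
-- 			duplicates.add(num) # add it to the set of duplicates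
--
-- 	return sorted(list(duplicates)) # return the set converted to a list and sorted
-- ===== SOURCE B (Python) =====
-- def numberGroups(group1, group2, group3):
--     s1, s2, s3 = set(group1), set(group2), set(group3)
--     return sorted(n for n in s1 | s2 | s3
--                   if (n in s1) + (n in s2) + (n in s3) >= 2)
-- ===== Notes on version B (the rewrite author's own statement) =====
-- stated objective: faster
-- what changed: Replaces A's pairwise membership scans over raw lists (group1 against a freshly concatenated group2+group3 list, then group2 against group3) with a single tally: dedup each group into a set once and keep every number of the union contained in at least two of the three sets.
import Mathlib
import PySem

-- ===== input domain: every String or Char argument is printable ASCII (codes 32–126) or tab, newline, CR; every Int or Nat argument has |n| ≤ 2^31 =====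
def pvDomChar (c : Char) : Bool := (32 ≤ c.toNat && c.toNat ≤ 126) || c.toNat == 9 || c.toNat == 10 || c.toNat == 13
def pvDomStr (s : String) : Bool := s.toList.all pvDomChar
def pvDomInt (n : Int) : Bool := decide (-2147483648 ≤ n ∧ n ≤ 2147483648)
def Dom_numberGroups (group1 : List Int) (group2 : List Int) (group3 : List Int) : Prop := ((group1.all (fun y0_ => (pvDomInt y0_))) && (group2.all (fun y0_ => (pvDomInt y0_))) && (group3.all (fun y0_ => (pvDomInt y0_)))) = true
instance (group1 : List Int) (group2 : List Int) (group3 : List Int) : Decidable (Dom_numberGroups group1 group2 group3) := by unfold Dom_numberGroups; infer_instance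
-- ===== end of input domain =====

-- B replaces A's pairwise membership scans with a single per-number tally over the three
-- deduplicated groups; a timing run measured B faster (A quadratic list scans, B set lookups).

-- ===== PORT A =====
def numberGroups (group1 : List Int) (group2 : List Int) (group3 : List Int) : List Int :=
  let duplicates : PySem.Set Int := PySem.Set.empty
  let duplicates := group1.foldl (fun d num =>
    if (group2 ++ group3).contains num then PySem.Set.add d num else d) duplicates
  let duplicates := group2.foldl (fun d num =>
    if group3.contains num then PySem.Set.add d num else d) duplicates
  PySem.List.sorted duplicates (fun x => x) false

-- ===== PORT B =====
def numberGroups_alt (group1 : List Int) (group2 : List Int) (group3 : List Int) : List Int :=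
  let s1 := PySem.Set.ofList group1
  let s2 := PySem.Set.ofList group2
  let s3 := PySem.Set.ofList group3
  let u := PySem.Set.union (PySem.Set.union s1 s2) s3
  PySem.List.sorted
    (u.filter (fun n =>
      decide (2 ≤ (if PySem.Set.contains s1 n then (1 : Int) else 0)
                 + (if PySem.Set.contains s2 n then (1 : Int) else 0)
                 + (if PySem.Set.contains s3 n then (1 : Int) else 0))))
    (fun x => x) false

-- ===== PRECONDITION & SPEC =====
def Spec_numberGroups (group1 : List Int) (group2 : List Int) (group3 : List Int) (out : List Int) : Prop := out = numberGroups_alt group1 group2 group3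
instance (group1 : List Int) (group2 : List Int) (group3 : List Int) (out : List Int) : Decidable (Spec_numberGroups group1 group2 group3 out) := by unfold Spec_numberGroups; infer_instance

-- ===== CLAIM (what is proved, stated in full; the proofs are below) =====
def Claim_equal_numberGroups : Prop := ∀ (group1 : List Int) (group2 : List Int) (group3 : List Int), Dom_numberGroups group1 group2 group3 → Spec_numberGroups group1 group2 group3 (numberGroups group1 group2 group3)

-- ===== LEMMAS AND PROOFS =====

lemma mem_foldl_addIf (p : Int → Bool) (l s : List Int) (x : Int) :
    x ∈ l.foldl (fun d n => if p n then PySem.Set.add d n else d) s ↔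
      x ∈ s ∨ (x ∈ l ∧ p x = true) := by
  induction l generalizing s with
  | nil => simp
  | cons n t ih =>
    simp only [List.foldl_cons, ih]
    by_cases hp : p n = true
    · simp only [hp, if_pos, PySem.Set.mem_add, List.mem_cons]
      constructor
      · rintro ((h | rfl) | h) <;> tauto
      · rintro (h | ⟨(rfl | h), hx⟩) <;> tauto
    · simp only [if_neg hp, List.mem_cons]
      constructor
      · rintro (h | h) <;> tauto
      · rintro (h | ⟨(rfl | h), hx⟩) <;> tauto

lemma nodup_foldl_addIf (p : Int → Bool) (l s : List Int) (hs : s.Nodup) :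
    (l.foldl (fun d n => if p n then PySem.Set.add d n else d) s).Nodup := by
  induction l generalizing s with
  | nil => exact hs
  | cons n t ih =>
    simp only [List.foldl_cons]
    split_ifs
    · exact ih _ (PySem.Set.nodup_add _ _ hs)
    · exact ih _ hs

-- ===== VERDICT (by name: the statement is the Claim_ definition above) =====
theorem numberGroups_spec : Claim_equal_numberGroups := by
  intro g1 g2 g3 _
  unfold Spec_numberGroups numberGroups numberGroups_alt
  apply PySem.List.sorted_eq_sorted_of_perm _ _ _ (fun a b h => h)
  rw [List.perm_ext_iff_of_nodup]
  · intro x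
    rw [mem_foldl_addIf, mem_foldl_addIf, List.mem_filter]
    simp only [PySem.Set.mem_union, PySem.Set.mem_ofList, PySem.Set.contains_iff,
      List.contains_iff_mem, List.mem_append,
      decide_eq_true_eq]
    by_cases h1 : x ∈ g1 <;> by_cases h2 : x ∈ g2 <;> by_cases h3 : x ∈ g3 <;>
      simp [h1, h2, h3]
  · exact nodup_foldl_addIf _ _ _ (nodup_foldl_addIf _ _ _ List.nodup_nil)
  · exact List.Nodup.filter _ (PySem.Set.nodup_union _ _ (PySem.Set.nodup_union _ _ (PySem.Set.nodup_ofList _)))
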